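-- pv_equiv track=rewrite | github.com/P-dilasha-004/Search-Engine | search_three.py | key_by_author
-- ===== SOURCE A (Python) =====
-- def key_by_author(article_titles, title_to_info):
--
--     if not title_to_info or not article_titles:
--         return {}
--
--     author_articles = {}
--
--     for article in article_titles:
--
--         if article not in title_to_info:
--             continue
--
--         author = title_to_info[article]['author']
--
--         if author not in author_articles:
--             author_articles[author] = []
--         author_articles[author].append(article)
--
--     return author_articles
-- ===== SOURCE B (Python) =====
-- def key_by_author(article_titles, title_to_info):
--
--     if not title_to_info or not article_titles:
--         return {}
--
--     out = {}
--     remaining = [t for t in article_titles if t in title_to_info]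
--     while remaining:
--         a0 = title_to_info[remaining[0]]['author']
--         out[a0] = [t for t in remaining if title_to_info[t]['author'] == a0]
--         remaining = [t for t in remaining if title_to_info[t]['author'] != a0]
--     return out
-- ===== Notes on version B (the rewrite author's own statement) =====
-- stated objective: alternative
-- what changed: Replaces A's single pass that incrementally mutates an author->articles dict with repeated partitioning: filter to the present titles, then repeatedly take the first remaining title's author, collect all its articles with one filter pass, and remove them, emitting one complete group per round.
import Mathlib
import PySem

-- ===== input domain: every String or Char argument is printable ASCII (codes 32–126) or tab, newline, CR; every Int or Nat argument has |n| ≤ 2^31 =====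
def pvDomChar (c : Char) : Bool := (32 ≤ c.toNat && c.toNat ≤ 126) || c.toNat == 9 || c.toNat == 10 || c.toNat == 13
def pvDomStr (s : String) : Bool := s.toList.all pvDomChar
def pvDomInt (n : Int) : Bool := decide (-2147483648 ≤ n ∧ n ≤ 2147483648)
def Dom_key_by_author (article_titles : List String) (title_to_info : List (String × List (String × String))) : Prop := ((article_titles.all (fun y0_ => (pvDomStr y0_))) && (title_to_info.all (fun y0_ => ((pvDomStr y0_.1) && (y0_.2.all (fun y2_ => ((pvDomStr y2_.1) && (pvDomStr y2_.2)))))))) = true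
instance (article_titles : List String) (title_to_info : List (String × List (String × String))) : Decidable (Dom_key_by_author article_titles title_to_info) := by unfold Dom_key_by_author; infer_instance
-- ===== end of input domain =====

-- B replaces A's incrementally-mutated author→articles dict with repeated partitioning:
-- filter to the present titles, then peel off one full author group per round
-- (first remaining title's author, one filter pass); alternative decomposition, no speed claim.

-- ===== PORT A =====
def key_by_author (article_titles : List String) (title_to_info : List (String × List (String × String))) : List (String × List String) :=
  if title_to_info.isEmpty || article_titles.isEmpty then []
  else
    (article_titles.foldl (fun acc article =>
      match (PySem.Dict.mk title_to_info).get? article with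
      | none => acc  -- 'if article not in title_to_info: continue'
      | some inf =>
        match (PySem.Dict.mk inf).get? "author" with
        | none => acc  -- Python raises KeyError here; such inputs are excluded by Pre_
        | some author =>
          let acc1 := if acc.contains author then acc else acc.insert author []
          acc1.insert author (acc1.getD author [] ++ [article]))
      (PySem.Dict.mk [])).items

-- ===== PORT B =====
-- title_to_info[t]['author'], as an Option (none where Python would raise KeyError)
def pvAuthorOf? (title_to_info : List (String × List (String × String))) (t : String) : Option String :=
  ((PySem.Dict.mk title_to_info).get? t).bind fun inf => (PySem.Dict.mk inf).get? "author"

-- B's while loop: peel off the first remaining title's whole author group each round.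
-- (The head always passes the '== a0' filter and fails the '!= a0' one, so the two
-- Python filters over 'remaining' are written as 't :: ts.filter' and 'ts.filter'.)
def pvGroupRec (title_to_info : List (String × List (String × String))) : List String → List (String × List String)
  | [] => []
  | t :: ts =>
    match pvAuthorOf? title_to_info t with
    | none => pvGroupRec title_to_info ts  -- Python raises KeyError here; excluded by Pre_
    | some a0 =>
      (a0, t :: ts.filter (fun u => pvAuthorOf? title_to_info u == some a0)) ::
      pvGroupRec title_to_info (ts.filter (fun u => !(pvAuthorOf? title_to_info u == some a0)))
termination_by L => L.length
decreasing_by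
  · simp
  · have h2 := List.length_filter_le (fun x : {u // u ∈ ts} => !(pvAuthorOf? title_to_info x.1 == some a0)) ts.attach
    simp only [List.length_attach] at h2
    simp
    omega

def key_by_author_alt (article_titles : List String) (title_to_info : List (String × List (String × String))) : List (String × List String) :=
  if title_to_info.isEmpty || article_titles.isEmpty then []
  else
    pvGroupRec title_to_info
      (article_titles.filter (fun t => (PySem.Dict.mk title_to_info).contains t))

-- ===== PRECONDITION & SPEC =====
-- Pre_ excludes exactly the inputs on which A raises KeyError: some looked-up title's
-- info dict lacks the key 'author' (B raises KeyError there too).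
def Pre_key_by_author (article_titles : List String) (title_to_info : List (String × List (String × String))) : Prop :=
  (article_titles.all (fun t =>
    match (PySem.Dict.mk title_to_info).get? t with
    | none => true
    | some inf => (PySem.Dict.mk inf).contains "author")) = true
instance (article_titles : List String) (title_to_info : List (String × List (String × String))) : Decidable (Pre_key_by_author article_titles title_to_info) := by unfold Pre_key_by_author; infer_instance

def pvWitness_key_by_author : List String × (List (String × List (String × String))) :=
  (["t1", "t2", "t1"], [("t1", [("author", "ann")]), ("t2", [("author", "bob")])])

def Spec_key_by_author (article_titles : List String) (title_to_info : List (String × List (String × String))) (out : List (String × List String)) : Prop := out = key_by_author_alt article_titles title_to_info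
instance (article_titles : List String) (title_to_info : List (String × List (String × String))) (out : List (String × List String)) : Decidable (Spec_key_by_author article_titles title_to_info out) := by unfold Spec_key_by_author; infer_instance

-- ===== CLAIM (what is proved, stated in full; the proofs are below) =====
def Claim_equal_key_by_author : Prop := ∀ (article_titles : List String) (title_to_info : List (String × List (String × String))), Dom_key_by_author article_titles title_to_info → Pre_key_by_author article_titles title_to_info → Spec_key_by_author article_titles title_to_info (key_by_author article_titles title_to_info)

-- ===== LEMMAS AND PROOFS =====

-- the (author, article) pair a title contributes (none when it is skipped / would raise)
def pvEmit (title_to_info : List (String × List (String × String))) (article : String) : Option (String × String) :=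
  ((PySem.Dict.mk title_to_info).get? article).bind fun inf =>
    ((PySem.Dict.mk inf).get? "author").map fun author => (author, article)

-- A's loop body, as a function of the accumulated dict and one emitted pair
def pvStepA (d : PySem.Dict String (List String)) (p : String × String) : PySem.Dict String (List String) :=
  let d1 := if d.contains p.1 then d else d.insert p.1 []
  d1.insert p.1 (d1.getD p.1 [] ++ [p.2])

-- first-appearance grouping of a pair list (the common value of both ports)
def pvGroup (ps : List (String × String)) : List (String × List String) :=
  (PySem.List.dedup (ps.map (fun p => p.1))).map
    (fun author => (author, (ps.filter (fun p => p.1 == author)).map (fun p => p.2)))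

lemma pvEmit_eq (title_to_info : List (String × List (String × String))) (t : String) :
    pvEmit title_to_info t = (pvAuthorOf? title_to_info t).map (fun au => (au, t)) := by
  unfold pvEmit pvAuthorOf?
  cases (PySem.Dict.mk title_to_info).get? t with
  | none => rfl
  | some inf => cases (PySem.Dict.mk inf).get? "author" <;> rfl

lemma pvFoldA (title_to_info : List (String × List (String × String))) :
    ∀ (titles : List String) (d : PySem.Dict String (List String)),
      titles.foldl (fun acc article =>
        match (PySem.Dict.mk title_to_info).get? article with
        | none => acc
        | some inf =>
          match (PySem.Dict.mk inf).get? "author" with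
          | none => acc
          | some author =>
            let acc1 := if acc.contains author then acc else acc.insert author []
            acc1.insert author (acc1.getD author [] ++ [article])) d
      = (titles.filterMap (pvEmit title_to_info)).foldl pvStepA d
  | [], d => by simp
  | t :: ts, d => by
      simp only [List.foldl_cons, List.filterMap_cons]
      cases h1 : (PySem.Dict.mk title_to_info).get? t with
      | none => simpa [pvEmit, h1] using pvFoldA title_to_info ts d
      | some inf =>
        cases h2 : (PySem.Dict.mk inf).get? "author" with
        | none => simpa [pvEmit, h1, h2] using pvFoldA title_to_info ts d
        | some author =>
          simpa [pvEmit, h1, h2, pvStepA] using pvFoldA title_to_info ts (pvStepA d (author, t))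

lemma pvDedup_snoc (l : List String) (x : String) :
    PySem.List.dedup (l ++ [x])
      = if x ∈ l then PySem.List.dedup l else PySem.List.dedup l ++ [x] := by
  rw [PySem.List.dedup_eq_ofList, PySem.List.dedup_eq_ofList,
      PySem.Set.ofList_eq_foldl, PySem.Set.ofList_eq_foldl, List.foldl_append]
  simp only [List.foldl_cons, List.foldl_nil]
  rw [← PySem.Set.ofList_eq_foldl]
  by_cases hx : x ∈ l
  · simp [PySem.Set.add, hx]
  · simp [PySem.Set.add, hx]

lemma pvFind_map (T : String → List String) :
    ∀ (authors : List String) (k : String), authors.Nodup → k ∈ authors →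
      (authors.map (fun au => (au, T au))).find? (fun p => p.1 == k) = some (k, T k)
  | a :: as, k, hn, hm => by
      simp only [List.map_cons, List.find?_cons]
      by_cases hak : a = k
      · subst hak; simp
      · have hb : (a == k) = false := by simp [hak]
        have hm' : k ∈ as := by
          rcases List.mem_cons.mp hm with h | h
          · exact absurd h.symm hak
          · exact h
        simpa [hb] using pvFind_map T as k (List.Nodup.of_cons hn) hm'

lemma pvFind_map_none (T : String → List String) :
    ∀ (authors : List String) (k : String), k ∉ authors →
      (authors.map (fun au => (au, T au))).find? (fun p => p.1 == k) = none
  | [], k, _ => rfl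
  | a :: as, k, hm => by
      have hak : (a == k) = false := by
        simp only [beq_eq_false_iff_ne, ne_eq]
        intro h; exact hm (h ▸ List.mem_cons_self)
      have hm' : k ∉ as := fun h => hm (List.mem_cons_of_mem a h)
      simpa [List.find?_cons, hak] using pvFind_map_none T as k hm'

lemma pvMain (ps : List (String × String)) :
    (ps.foldl pvStepA (PySem.Dict.mk [])).items = pvGroup ps := by
  induction ps using List.reverseRecOn with
  | nil => simp [pvGroup, PySem.List.dedup]
  | append_singleton ps p ih =>
    rw [List.foldl_append]
    simp only [List.foldl_cons, List.foldl_nil]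
    set D := ps.foldl pvStepA (PySem.Dict.mk []) with hDdef
    set T : String → List String :=
      fun author => (ps.filter (fun p => p.1 == author)).map (fun p => p.2) with hT
    set authors := PySem.List.dedup (ps.map (fun p => p.1)) with hauthors
    have hDitems : D.items = authors.map (fun au => (au, T au)) := ih
    have hnodup : authors.Nodup := by
      rw [hauthors, PySem.List.dedup_eq_ofList]; exact PySem.Set.nodup_ofList _
    have hGroup : pvGroup (ps ++ [p])
        = (PySem.List.dedup (ps.map (fun p => p.1) ++ [p.1])).map
            (fun au => (au, T au ++ if (p.1 == au) = true then [p.2] else [])) := by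
      unfold pvGroup
      rw [List.map_append, List.map_singleton]
      refine List.map_congr_left (fun au _ => ?_)
      by_cases hc : (p.1 == au) = true <;>
        simp [List.filter_append, hT, hc]
    by_cases hmem : p.1 ∈ ps.map (fun p => p.1)
    · -- the author already has an entry
      have hmemA : p.1 ∈ authors := by
        rw [hauthors]; exact (PySem.List.mem_dedup _ _).mpr hmem
      have hc : D.contains p.1 = true := by
        simp only [PySem.Dict.contains, hDitems, List.any_map]
        exact List.any_eq_true.mpr ⟨p.1, hmemA, by simp⟩
      have hfind : D.items.find? (fun q => q.1 == p.1) = some (p.1, T p.1) := by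
        rw [hDitems]; exact pvFind_map T authors p.1 hnodup hmemA
      have hgetD : D.getD p.1 [] = T p.1 := by
        simp [PySem.Dict.getD, PySem.Dict.get?, hfind]
      rw [pvStepA]
      simp only [hc, if_true]
      rw [PySem.Dict.items_insert_of_contains D _ hc, hDitems, hgetD, hGroup,
          pvDedup_snoc, if_pos hmem, ← hauthors]
      simp only [List.map_map]
      refine List.map_congr_left (fun au hau => ?_)
      by_cases hap : au = p.1
      · subst hap; simp
      · have h1 : (au == p.1) = false := by simp [hap]
        have h2 : (p.1 == au) = false := by
          simp only [beq_eq_false_iff_ne, ne_eq]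
          exact fun h => hap h.symm
        simp [h1, h2, Function.comp]
    · -- a fresh author: A appends a new entry at the end
      have hmemA : p.1 ∉ authors := by
        rw [hauthors]; exact fun h => hmem ((PySem.List.mem_dedup _ _).mp h)
      have hne : ∀ au ∈ authors, (au == p.1) = false := by
        intro au hau
        simp only [beq_eq_false_iff_ne, ne_eq]
        intro h; exact hmemA (h ▸ hau)
      have hc : D.contains p.1 = false := by
        simp only [PySem.Dict.contains, hDitems, List.any_map]
        rw [Bool.eq_false_iff]
        intro h
        rcases List.any_eq_true.mp h with ⟨au, hau, hbe⟩
        exact absurd hbe (by simp [hne au hau])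
      have hT1 : T p.1 = [] := by
        have hfil : ps.filter (fun q => q.1 == p.1) = [] := by
          rw [List.filter_eq_nil_iff]
          intro q hq
          have hqm : q.1 ∈ ps.map (fun p => p.1) := List.mem_map.mpr ⟨q, hq, rfl⟩
          intro hbe
          exact hmem ((eq_of_beq hbe) ▸ hqm)
        simp [hT, hfil]
      rw [pvStepA]
      simp only [hc, if_false, Bool.false_eq_true]
      have hitems1 : (D.insert p.1 []).items = authors.map (fun au => (au, T au)) ++ [(p.1, [])] :=
        by rw [PySem.Dict.items_insert_of_not_contains D _ hc, hDitems]
      have hc1 : (D.insert p.1 []).contains p.1 = true := by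
        simp [PySem.Dict.contains, hitems1]
      have hfind1 : (D.insert p.1 []).items.find? (fun q => q.1 == p.1) = some (p.1, []) := by
        rw [hitems1, List.find?_append, pvFind_map_none T authors p.1 hmemA]
        simp
      have hgetD1 : (D.insert p.1 []).getD p.1 [] = [] := by
        simp [PySem.Dict.getD, PySem.Dict.get?, hfind1]
      rw [PySem.Dict.items_insert_of_contains _ _ hc1, hitems1, hgetD1, hGroup,
          pvDedup_snoc, if_neg hmem, ← hauthors]
      simp only [List.map_append, List.map_map]
      have hleft : authors.map ((fun q => if (q.1 == p.1) = true then (p.1, [] ++ [p.2]) else q) ∘ (fun au => (au, T au)))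
          = authors.map (fun au => (au, T au ++ if (p.1 == au) = true then [p.2] else [])) := by
        refine List.map_congr_left (fun au hau => ?_)
        have h1 := hne au hau
        have hap : ¬ au = p.1 := by
          intro h; exact hmemA (h ▸ hau)
        have h2 : (p.1 == au) = false := by
          simp only [beq_eq_false_iff_ne, ne_eq]
          exact fun h => hap h.symm
        simp [h1, h2, Function.comp]
      rw [hleft]
      simp [hT1]

-- dropping titles not in title_to_info does not change the emitted pairs
lemma pvFilterMap_present (title_to_info : List (String × List (String × String))) :
    ∀ (titles : List String),
      (titles.filter (fun t => (PySem.Dict.mk title_to_info).contains t)).filterMap (pvEmit title_to_info)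
        = titles.filterMap (pvEmit title_to_info)
  | [] => rfl
  | t :: ts => by
      simp only [List.filter_cons]
      by_cases hc : (PySem.Dict.mk title_to_info).contains t = true
      · simp only [hc, if_true, List.filterMap_cons]
        rw [pvFilterMap_present title_to_info ts]
      · have hget : (PySem.Dict.mk title_to_info).get? t = none := by
          have := PySem.Dict.contains_eq_isSome_get? (PySem.Dict.mk title_to_info) t
          rw [this] at hc
          cases h : (PySem.Dict.mk title_to_info).get? t
          · rfl
          · rw [h] at hc; simp at hc
        simp only [hc, if_false, List.filterMap_cons, pvEmit, hget, Option.bind_none,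
          Bool.false_eq_true]
        exact pvFilterMap_present title_to_info ts

-- titles whose author is a, as pairs vs as titles
lemma pvPairs_yes (title_to_info : List (String × List (String × String))) (a : String) :
    ∀ (ts : List String),
      ((ts.filterMap (pvEmit title_to_info)).filter (fun q => q.1 == a)).map (fun q => q.2)
        = ts.filter (fun u => pvAuthorOf? title_to_info u == some a)
  | [] => rfl
  | t :: ts => by
      rw [List.filterMap_cons, List.filter_cons, pvEmit_eq]
      cases h : pvAuthorOf? title_to_info t with
      | none => simpa [h] using pvPairs_yes title_to_info a ts
      | some au =>
        by_cases hau : (au == a) = true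
        · simp only [Option.map_some, List.filter_cons, hau, if_true, List.map_cons]
          rw [pvPairs_yes title_to_info a ts]
          simp [hau]
        · simp only [Option.map_some, List.filter_cons]
          simp only [Bool.not_eq_true] at hau
          have : (some au == some a) = false := by simpa using hau
          simp only [hau, this, Bool.false_eq_true, if_false]
          exact pvPairs_yes title_to_info a ts

lemma pvPairs_no (title_to_info : List (String × List (String × String))) (a : String) :
    ∀ (ts : List String),
      (ts.filter (fun u => !(pvAuthorOf? title_to_info u == some a))).filterMap (pvEmit title_to_info)
        = (ts.filterMap (pvEmit title_to_info)).filter (fun q => !(q.1 == a))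
  | [] => rfl
  | t :: ts => by
      cases h : pvAuthorOf? title_to_info t with
      | none =>
        have he : pvEmit title_to_info t = none := by rw [pvEmit_eq, h]; rfl
        have hc : (!(pvAuthorOf? title_to_info t == some a)) = true := by simp [h]
        simp only [List.filter_cons, hc, if_true, List.filterMap_cons, he]
        exact pvPairs_no title_to_info a ts
      | some au =>
        have he : pvEmit title_to_info t = some (au, t) := by rw [pvEmit_eq, h]; rfl
        by_cases hau : (au == a) = true
        · have hc : (!(pvAuthorOf? title_to_info t == some a)) = false := by simp [h, hau]
          simp only [List.filter_cons, hc, Bool.false_eq_true, if_false, List.filterMap_cons, he,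
            hau, Bool.not_true]
          exact pvPairs_no title_to_info a ts
        · have hxa' : (au == a) = false := by simpa using hau
          have hc : (!(pvAuthorOf? title_to_info t == some a)) = true := by simp [h, hxa']
          have hq : (!((au, t).1 == a)) = true := by simp [hxa']
          simp only [List.filter_cons, hc, if_true, List.filterMap_cons, he, hq]
          rw [pvPairs_no title_to_info a ts]

-- first-occurrence dedup peels its head and everything equal to it
lemma pvDedup_cons (a : String) (l : List String) :
    PySem.List.dedup (a :: l) = a :: PySem.List.dedup (l.filter (fun x => !(x == a))) := by
  rw [PySem.List.dedup_eq_ofList, PySem.List.dedup_eq_ofList,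
      PySem.Set.ofList_eq_foldl, PySem.Set.ofList_eq_foldl]
  simp only [List.foldl_cons]
  have hadd : PySem.Set.add ([] : List String) a = [a] := by simp [PySem.Set.add]
  rw [hadd]
  -- fold over l starting from [a] = a :: fold over (l minus a) starting from []
  suffices h : ∀ (m : List String) (acc : List String), a ∈ acc →
      m.foldl PySem.Set.add acc = (m.filter (fun x => !(x == a))).foldl PySem.Set.add acc by
    have h2 : ∀ (m : List String) (acc : List String), a ∉ m →
        m.foldl PySem.Set.add (a :: acc) = a :: m.foldl PySem.Set.add acc := by
      intro m
      induction m with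
      | nil => intro acc _; rfl
      | cons x xs ih =>
        intro acc hm
        have hxa : x ≠ a := fun h => hm (h ▸ List.mem_cons_self)
        have hstep : PySem.Set.add (a :: acc) x = a :: PySem.Set.add acc x := by
          simp only [PySem.Set.add, PySem.Set.contains, List.contains_cons]
          have : (x == a) = false := by simpa using hxa
          simp [this]
          by_cases hx : x ∈ acc <;> simp [hx]
        simp only [List.foldl_cons, hstep]
        exact ih _ (fun h => hm (List.mem_cons_of_mem x h))
    rw [h l [a] List.mem_cons_self]
    have hnotin : a ∉ l.filter (fun x => !(x == a)) := by
      intro hmem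
      have := List.of_mem_filter hmem
      simp at this
    simpa using h2 (l.filter (fun x => !(x == a))) [] hnotin
  intro m
  induction m with
  | nil => intro acc _; rfl
  | cons x xs ih =>
    intro acc hacc
    rw [List.filter_cons]
    by_cases hxa : (x == a) = true
    · have hx : x = a := eq_of_beq hxa
      have hadd2 : PySem.Set.add acc x = acc := by
        simp [PySem.Set.add, PySem.Set.contains, hx, hacc]
      simp only [hxa, Bool.not_true, Bool.false_eq_true, if_false, List.foldl_cons, hadd2]
      exact ih acc hacc
    · have hxa' : (x == a) = false := by simpa using hxa
      simp only [hxa', Bool.not_false, if_true, List.foldl_cons]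
      refine ih (PySem.Set.add acc x) ?_
      simp only [PySem.Set.add]
      split_ifs with hmem
      · exact hacc
      · exact List.mem_append_left _ hacc

-- pvGroup peels its first pair's whole author group
lemma pvGroup_cons (a : String) (x : String) (qs : List (String × String)) :
    pvGroup ((a, x) :: qs)
      = (a, x :: (qs.filter (fun q => q.1 == a)).map (fun q => q.2)) ::
        pvGroup (qs.filter (fun q => !(q.1 == a))) := by
  unfold pvGroup
  rw [List.map_cons]
  have hmapfst : (qs.filter (fun q => !(q.1 == a))).map (fun p => p.1)
      = (qs.map (fun p => p.1)).filter (fun y => !(y == a)) := by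
    induction qs with
    | nil => rfl
    | cons q qs ih =>
      rw [List.filter_cons, List.map_cons, List.filter_cons]
      by_cases h : (q.1 == a) = true
      · simp only [h, Bool.not_true, Bool.false_eq_true, if_false]; exact ih
      · simp only [Bool.not_eq_true] at h
        simp only [h, Bool.not_false, if_true, List.map_cons]
        rw [ih]
  rw [pvDedup_cons, ← hmapfst, List.map_cons]
  congr 1
  · simp
  · refine List.map_congr_left (fun au hau => ?_)
    have hau_mem : au ∈ (qs.filter (fun q => !(q.1 == a))).map (fun p => p.1) := by
      have := (PySem.List.mem_dedup _ au).mp hau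
      exact this
    have hne : (au == a) = false := by
      rcases List.mem_map.mp hau_mem with ⟨q, hq, rfl⟩
      have := List.of_mem_filter hq
      simpa using this
    have hane : (a == au) = false := by
      rw [beq_eq_false_iff_ne] at *
      exact fun h => hne h.symm
    rw [List.filter_cons]
    simp only [hane, Bool.false_eq_true, if_false]
    congr 2
    rw [List.filter_filter]
    refine List.filter_congr (fun q _ => ?_)
    by_cases h : (q.1 == au) = true
    · have : q.1 = au := eq_of_beq h
      simp [this, hne]
    · simp only [Bool.not_eq_true] at h
      simp [h]

-- B's loop computes pvGroup of the emitted pairs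
lemma pvGroupRec_eq (title_to_info : List (String × List (String × String))) :
    ∀ (L : List String),
      pvGroupRec title_to_info L = pvGroup (L.filterMap (pvEmit title_to_info))
  | [] => by simp [pvGroupRec, pvGroup, PySem.List.dedup]
  | t :: ts => by
      rw [pvGroupRec, List.filterMap_cons, pvEmit_eq]
      cases h : pvAuthorOf? title_to_info t with
      | none =>
        simp only [Option.map_none]
        exact pvGroupRec_eq title_to_info ts
      | some a0 =>
        simp only [Option.map_some]
        rw [pvGroup_cons, pvGroupRec_eq title_to_info (ts.filter (fun u => !(pvAuthorOf? title_to_info u == some a0))),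
            pvPairs_no, pvPairs_yes]
  termination_by L => L.length
  decreasing_by
    · simp
    · have h1 := List.length_filter_le (fun u => !(pvAuthorOf? title_to_info u == some a0)) ts
      have h2 := List.length_filter_le (fun x : {u // u ∈ ts} => !(pvAuthorOf? title_to_info x.1 == some a0)) ts.attach
      simp only [List.length_attach] at h2
      simp
      omega

lemma pvPorts_eq (article_titles : List String) (title_to_info : List (String × List (String × String))) :
    key_by_author article_titles title_to_info = key_by_author_alt article_titles title_to_info := by
  unfold key_by_author key_by_author_alt
  by_cases h : (title_to_info.isEmpty || article_titles.isEmpty) = true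
  · simp only [h, if_true]
  · simp only [h, if_false, Bool.false_eq_true]
    rw [pvFoldA title_to_info article_titles (PySem.Dict.mk []), pvMain,
        pvGroupRec_eq, pvFilterMap_present]

-- ===== VERDICT (by name: the statement is the Claim_ definition above) =====
theorem key_by_author_spec : Claim_equal_key_by_author := by
  intro article_titles title_to_info _ _
  unfold Spec_key_by_author
  exact pvPorts_eq article_titles title_to_info
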